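-- pv_equiv track=rewrite | github.com/MahaZainab/Meta-Hacker-Cup-2024 | Round1/B/B.py | precompute_twin_prime_counts
-- ===== SOURCE A (Python) =====
-- def precompute_twin_prime_counts(sieve, max_n):
--     twin_prime_counts = [0] * (max_n + 1)
--     count = 0
--     for i in range(3, max_n + 1):
--         if sieve[i] and sieve[i - 2]:
--             count += 1
--         twin_prime_counts[i] = count
--     return twin_prime_counts
-- ===== SOURCE B (Python) =====
-- def precompute_twin_prime_counts(sieve, max_n):
--     # Different algorithm: collect the positions of twin primes once, then answer
--     # each index i by a binary-search rank query (how many positions are <= i)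
--     # on that sorted position list, instead of carrying a running counter.
--     twins = [i for i in range(3, max_n + 1) if sieve[i] and sieve[i - 2]]
--
--     def rank(x):
--         lo, hi = 0, len(twins)
--         while lo < hi:
--             mid = (lo + hi) // 2
--             if x < twins[mid]:
--                 hi = mid
--             else:
--                 lo = mid + 1
--         return lo
--
--     return [rank(i) for i in range(max_n + 1)]
-- ===== Notes on version B (the rewrite author's own statement) =====
-- stated objective: alternative
-- what changed: Replaces A's single scan with a running counter by a rank-query algorithm: build the sorted list of twin-prime positions, then answer every index with a hand-written binary search (bisect_right) over that list.
import Mathlib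
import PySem

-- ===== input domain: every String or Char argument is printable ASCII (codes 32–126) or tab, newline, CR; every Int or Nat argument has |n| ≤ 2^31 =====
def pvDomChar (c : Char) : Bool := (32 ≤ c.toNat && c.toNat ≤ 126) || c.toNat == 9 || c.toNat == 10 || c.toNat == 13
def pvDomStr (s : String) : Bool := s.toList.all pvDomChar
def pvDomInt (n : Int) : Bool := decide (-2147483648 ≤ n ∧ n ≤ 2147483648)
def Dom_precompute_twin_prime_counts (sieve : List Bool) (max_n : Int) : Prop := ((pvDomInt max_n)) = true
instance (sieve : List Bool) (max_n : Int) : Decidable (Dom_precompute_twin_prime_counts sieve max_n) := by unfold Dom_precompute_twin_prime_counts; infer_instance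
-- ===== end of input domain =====

-- B replaces A's fused counter scan by a rank-query algorithm (sorted twin-position
-- list + hand-written binary search per index); return value proved equal on Pre_.

-- ===== PORT A =====
def precompute_twin_prime_counts (sieve : List Bool) (max_n : Int) : List Int :=
  -- twin_prime_counts = [0] * (max_n + 1)
  let tpc : List Int := List.replicate (max_n + 1).toNat 0
  -- for i in range(3, max_n + 1): …  (sieve[i] / sieve[i-2] are in range under Pre_,
  -- where pyGetD coincides with Python's sieve[i])
  let st := (PySem.List.pyRange 3 (max_n + 1) 1).foldl
    (fun (st : List Int × Int) i =>
      let count := if PySem.List.pyGetD sieve i false && PySem.List.pyGetD sieve (i - 2) false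
                   then st.2 + 1 else st.2
      (st.1.set i.toNat count, count))
    (tpc, 0)
  st.1

-- ===== PORT B =====
-- while lo < hi: mid = (lo + hi) // 2; if x < twins[mid]: hi = mid else: lo = mid + 1
-- (twins[mid] via pyGetD: mid is always in range 0 ≤ lo ≤ mid < hi ≤ len(twins))
def pvRankGo (a : List Int) (x lo hi : Int) : Int :=
  if h : lo < hi then
    if x < PySem.List.pyGetD a (PySem.Int.floordiv (lo + hi) 2) 0 then
      pvRankGo a x lo (PySem.Int.floordiv (lo + hi) 2)
    else
      pvRankGo a x (PySem.Int.floordiv (lo + hi) 2 + 1) hi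
  else lo
termination_by (hi - lo).toNat
decreasing_by
  · have h1 : PySem.Int.floordiv (lo + hi) 2 < hi :=
      (PySem.Int.floordiv_lt_iff_lt_mul (by omega)).mpr (by omega)
    have h2 : lo ≤ PySem.Int.floordiv (lo + hi) 2 :=
      (PySem.Int.le_floordiv_iff_mul_le (by omega)).mpr (by omega)
    omega
  · have h2' : lo ≤ PySem.Int.floordiv (lo + hi) 2 :=
      (PySem.Int.le_floordiv_iff_mul_le (by omega)).mpr (by omega)
    omega

-- def rank(x): lo, hi = 0, len(twins); …; return lo
def pvRank (twins : List Int) (x : Int) : Int := pvRankGo twins x 0 (twins.length : Int)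

def precompute_twin_prime_counts_alt (sieve : List Bool) (max_n : Int) : List Int :=
  -- twins = [i for i in range(3, max_n + 1) if sieve[i] and sieve[i - 2]]
  let twins : List Int := (PySem.List.pyRange 3 (max_n + 1) 1).filter
    (fun i => PySem.List.pyGetD sieve i false && PySem.List.pyGetD sieve (i - 2) false)
  -- return [rank(i) for i in range(max_n + 1)]
  (PySem.List.pyRange 0 (max_n + 1) 1).map (fun i => pvRank twins i)

-- ===== PRECONDITION & SPEC =====
-- Python A raises IndexError (sieve[i] for some 3 ≤ i ≤ max_n) when max_n ≥ 3 and len(sieve) ≤ max_n.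
def Pre_precompute_twin_prime_counts (sieve : List Bool) (max_n : Int) : Prop :=
  max_n < 3 ∨ max_n < (sieve.length : Int)
instance (sieve : List Bool) (max_n : Int) : Decidable (Pre_precompute_twin_prime_counts sieve max_n) := by unfold Pre_precompute_twin_prime_counts; infer_instance
def pvWitness_precompute_twin_prime_counts : List Bool × Int :=
  ([false, false, true, true, false, true, false, true], 7)

def Spec_precompute_twin_prime_counts (sieve : List Bool) (max_n : Int) (out : List Int) : Prop := out = precompute_twin_prime_counts_alt sieve max_n
instance (sieve : List Bool) (max_n : Int) (out : List Int) : Decidable (Spec_precompute_twin_prime_counts sieve max_n out) := by unfold Spec_precompute_twin_prime_counts; infer_instance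

-- ===== CLAIM (what is proved, stated in full; the proofs are below) =====
def Claim_equal_precompute_twin_prime_counts : Prop := ∀ (sieve : List Bool) (max_n : Int), Dom_precompute_twin_prime_counts sieve max_n → Pre_precompute_twin_prime_counts sieve max_n → Spec_precompute_twin_prime_counts sieve max_n (precompute_twin_prime_counts sieve max_n)

-- ===== LEMMAS AND PROOFS =====

-- A's loop body, the twin predicate, the twin-position list up to n, and the count ≤ j
def pvStepA (sieve : List Bool) (st : List Int × Int) (i : Int) : List Int × Int :=
  let count := if PySem.List.pyGetD sieve i false && PySem.List.pyGetD sieve (i - 2) false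
               then st.2 + 1 else st.2
  (st.1.set i.toNat count, count)

def pvTwin (sieve : List Bool) (i : Int) : Bool :=
  PySem.List.pyGetD sieve i false && PySem.List.pyGetD sieve (i - 2) false

def pvTwins (sieve : List Bool) (n : Int) : List Int :=
  (PySem.List.pyRange 3 n 1).filter (pvTwin sieve)

def pvCntLe (sieve : List Bool) (n j : Int) : Int :=
  ((pvTwins sieve n).countP (fun t => decide (t ≤ j)) : Int)

-- a positive-bound range equals the range at its toNat
lemma pyRange_toNat (a b : Int) (ha : 0 ≤ a) :
    PySem.List.pyRange a b 1 = PySem.List.pyRange a (b.toNat : Int) 1 := by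
  by_cases hb : 0 ≤ b
  · rw [Int.toNat_of_nonneg hb]
  · rw [PySem.List.pyRange_one_eq_nil (by omega), PySem.List.pyRange_one_eq_nil (by omega)]

-- A's fold ignores a tail beyond all written indices
lemma foldA_append (sieve : List Bool) (ixs : List Int) (t : List Int) :
    ∀ (l : List Int) (c : Int), (∀ i ∈ ixs, 0 ≤ i ∧ i.toNat < l.length) →
    ixs.foldl (pvStepA sieve) (l ++ t, c)
      = ((ixs.foldl (pvStepA sieve) (l, c)).1 ++ t, (ixs.foldl (pvStepA sieve) (l, c)).2) := by
  induction ixs with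
  | nil => intro l c _; simp
  | cons i ixs ih =>
    intro l c h
    obtain ⟨hi0, hil⟩ := h i (List.mem_cons_self ..)
    have hset : ∀ v : Int, (l ++ t).set i.toNat v = l.set i.toNat v ++ t := by
      intro v; rw [List.set_append_left _ _ hil]
    simp only [List.foldl_cons, pvStepA, hset]
    exact ih _ _ (by intro j hj; have := h j (List.mem_cons_of_mem _ hj); simpa using this)

-- twin positions are strictly increasing
lemma twins_sorted (sieve : List Bool) (n : Int) :
    (pvTwins sieve n).Pairwise (· ≤ ·) :=
  ((PySem.List.pairwise_lt_pyRange_one 3 n).filter (pvTwin sieve)).imp le_of_lt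

-- binary-search invariant: on a sorted list, with everything left of lo known ≤ x and
-- everything from hi known > x, pvRankGo returns the number of elements ≤ x
lemma rankGo_eq (a : List Int) (x : Int) (hs : a.Pairwise (· ≤ ·)) :
    ∀ (m : Nat) (lo hi : Int), (hi - lo).toNat = m → 0 ≤ lo → lo ≤ hi → hi ≤ (a.length : Int) →
    (∀ (k : Nat) (hk : k < a.length), (k : Int) < lo → a[k] ≤ x) →
    (∀ (k : Nat) (hk : k < a.length), hi ≤ (k : Int) → x < a[k]) →
    pvRankGo a x lo hi = (a.countP (fun t => decide (t ≤ x)) : Int) := by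
  intro m
  induction m using Nat.strong_induction_on with
  | _ m ih =>
    intro lo hi hm h0 hlh hhl hlow hhigh
    rw [pvRankGo]
    by_cases h : lo < hi
    · rw [dif_pos h]
      have hmlo : lo ≤ PySem.Int.floordiv (lo + hi) 2 :=
        (PySem.Int.le_floordiv_iff_mul_le (by omega)).mpr (by omega)
      have hmhi : PySem.Int.floordiv (lo + hi) 2 < hi :=
        (PySem.Int.floordiv_lt_iff_lt_mul (by omega)).mpr (by omega)
      set mid := PySem.Int.floordiv (lo + hi) 2 with hmid
      have hmidlen : mid.toNat < a.length := by omega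
      have hget : PySem.List.pyGetD a mid 0 = a[mid.toNat] :=
        PySem.List.pyGetD_eq_getElem a 0 (by omega) (by omega)
      have hsorted := List.pairwise_iff_getElem.mp hs
      by_cases hc : x < PySem.List.pyGetD a mid 0
      · rw [if_pos hc]
        rw [hget] at hc
        refine ih (mid - lo).toNat (by omega) lo mid (by omega) h0 hmlo (by omega) hlow ?_
        intro k hk hmk
        rcases eq_or_lt_of_le (show mid.toNat ≤ k by omega) with heq | hlt
        · exact heq ▸ hc
        · exact hc.trans_le (hsorted mid.toNat k hmidlen hk hlt)
      · rw [if_neg hc]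
        rw [hget] at hc
        rw [not_lt] at hc
        refine ih (hi - mid - 1).toNat (by omega) (mid + 1) hi (by omega) (by omega)
          (by omega) hhl ?_ hhigh
        intro k hk hmk
        rcases eq_or_lt_of_le (show k ≤ mid.toNat by omega) with heq | hlt
        · exact heq ▸ hc
        · exact (hsorted k mid.toNat hk hmidlen hlt).trans hc
    · rw [dif_neg h]
      have hlo : lo = hi := le_antisymm hlh (by omega)
      subst hlo
      -- every index < lo satisfies t ≤ x, every index ≥ lo fails it: countP = lo
      have hsplit : a = a.take lo.toNat ++ a.drop lo.toNat := (List.take_append_drop _ _).symm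
      have htake : (a.take lo.toNat).countP (fun t => decide (t ≤ x)) = lo.toNat := by
        rw [List.countP_eq_length.mpr, List.length_take]
        · omega
        · intro t ht
          obtain ⟨i, hilen, hit⟩ := List.mem_iff_getElem.mp ht
          have hi' : i < a.length := by
            have := hilen; simp [List.length_take] at this; omega
          have : (a.take lo.toNat)[i]'hilen = a[i]'hi' := List.getElem_take
          rw [this] at hit
          have hile : (i : Int) < lo := by
            have := hilen; simp [List.length_take] at this; omega
          exact hit ▸ (by simpa using hlow i hi' hile)
      have hdrop : (a.drop lo.toNat).countP (fun t => decide (t ≤ x)) = 0 := by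
        rw [List.countP_eq_zero]
        intro t ht
        obtain ⟨i, hilen, hit⟩ := List.mem_iff_getElem.mp ht
        have hi' : lo.toNat + i < a.length := by
          have := hilen; simp [List.length_drop] at this; omega
        have : (a.drop lo.toNat)[i]'hilen = a[lo.toNat + i]'hi' := List.getElem_drop
        rw [this] at hit
        have := hhigh (lo.toNat + i) hi' (by push_cast; omega)
        simp [← hit]
        omega
      conv_rhs => rw [hsplit]
      rw [List.countP_append, htake, hdrop]
      omega

-- rank = count of twin positions ≤ x
lemma rank_eq_cnt (sieve : List Bool) (n x : Int) :
    pvRank (pvTwins sieve n) x = pvCntLe sieve n x := by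
  unfold pvRank pvCntLe
  refine rankGo_eq _ x (twins_sorted sieve n)
    (((pvTwins sieve n).length : Int) - 0).toNat 0 ((pvTwins sieve n).length : Int)
    rfl le_rfl (by positivity) le_rfl ?_ ?_
  · intro k hk hklo; exact absurd hklo (by omega)
  · intro k hk hkhi; exact absurd hkhi (by omega)

-- the heart: A's fold state over range(3, n) is the table of counts-≤ with the twin total
lemma mainA (sieve : List Bool) (n : Nat) :
    (PySem.List.pyRange 3 (n : Int) 1).foldl (pvStepA sieve) (List.replicate n 0, 0)
      = ((PySem.List.pyRange 0 (n : Int) 1).map (fun j => pvCntLe sieve (n : Int) j),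
         ((pvTwins sieve (n : Int)).length : Int)) := by
  induction n with
  | zero => simp [PySem.List.pyRange_one_eq_nil, pvTwins]
  | succ n ih =>
    have hnn : (0:Int) ≤ (n:Int) := by positivity
    have hsplitB : PySem.List.pyRange 0 ((n:Int) + 1) 1
        = PySem.List.pyRange 0 (n:Int) 1 ++ [(n:Int)] := PySem.List.pyRange_one_succ_right hnn
    by_cases h3 : 3 ≤ (n : Int)
    · have hsplitA : PySem.List.pyRange 3 ((n:Int) + 1) 1
          = PySem.List.pyRange 3 (n:Int) 1 ++ [(n:Int)] := PySem.List.pyRange_one_succ_right h3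
      have hrep : List.replicate (n + 1) (0:Int) = List.replicate n 0 ++ [0] :=
        List.replicate_succ'
      have hmem : ∀ i ∈ PySem.List.pyRange 3 (n:Int) 1,
          0 ≤ i ∧ i.toNat < (List.replicate n (0:Int)).length := by
        intro i hi
        rw [PySem.List.mem_pyRange_one] at hi
        refine ⟨by omega, ?_⟩
        simp only [List.length_replicate]; omega
      -- twins of n+1 split off the last candidate
      have htw : pvTwins sieve ((n:Int) + 1)
          = pvTwins sieve (n:Int) ++ (if pvTwin sieve (n:Int) then [(n:Int)] else []) := by
        unfold pvTwins
        rw [hsplitA, List.filter_append]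
        congr 1
        by_cases ht : pvTwin sieve (n:Int) <;> simp [ht]
      -- counts ≤ j are unchanged for j < n
      have hcnt : ∀ j ∈ PySem.List.pyRange 0 (n:Int) 1,
          pvCntLe sieve ((n:Int) + 1) j = pvCntLe sieve (n:Int) j := by
        intro j hj
        rw [PySem.List.mem_pyRange_one] at hj
        unfold pvCntLe
        rw [htw, List.countP_append]
        have : (if pvTwin sieve (n:Int) then [(n:Int)] else []).countP
            (fun t => decide (t ≤ j)) = 0 := by
          by_cases ht : pvTwin sieve (n:Int) <;> simp [ht] <;> omega
        rw [this]; simp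
      -- count ≤ n over twins(n+1) is the full length
      have hcntn : pvCntLe sieve ((n:Int) + 1) (n:Int)
          = ((pvTwins sieve ((n:Int) + 1)).length : Int) := by
        unfold pvCntLe
        congr 1
        rw [List.countP_eq_length.mpr]
        intro t ht
        unfold pvTwins at ht
        have := List.mem_of_mem_filter ht
        rw [PySem.List.mem_pyRange_one] at this
        simp; omega
      push_cast [hsplitA, hsplitB, hrep] at *
      rw [List.foldl_append, foldA_append sieve _ _ _ _ hmem, ih,
          List.map_append, List.map_congr_left hcnt]
      have hlen : ((PySem.List.pyRange 0 (n:Int) 1).map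
          (fun j => pvCntLe sieve (n:Int) j)).length = n := by
        simp [PySem.List.length_pyRange_one]
      simp only [List.foldl_cons, List.foldl_nil, List.map_cons, List.map_nil]
      simp only [pvStepA]
      have hsetlast : ∀ v : Int,
          (((PySem.List.pyRange 0 (n:Int) 1).map (fun j => pvCntLe sieve (n:Int) j)) ++ [0]).set
            (n:Int).toNat v
          = ((PySem.List.pyRange 0 (n:Int) 1).map (fun j => pvCntLe sieve (n:Int) j)) ++ [v] := by
        intro v
        have hn : (n:Int).toNat = ((PySem.List.pyRange 0 (n:Int) 1).map
            (fun j => pvCntLe sieve (n:Int) j)).length := by rw [hlen]; simp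
        rw [hn, List.set_append_right _ _ (le_refl _)]
        simp
      rw [htw, hcntn, htw]
      by_cases hc : (PySem.List.pyGetD sieve (↑n) false && PySem.List.pyGetD sieve (↑n - 2) false) = true
      · rw [if_pos hc, hsetlast, if_pos (show pvTwin sieve (↑n:Int) = true from hc)]
        simp
      · rw [if_neg hc, hsetlast, if_neg (show ¬ pvTwin sieve (↑n:Int) = true from hc)]
        simp [List.length_append]
    · -- n + 1 ≤ 3: the A-loop range is empty and there are no twins yet
      have hA1 : PySem.List.pyRange 3 ((n:Int) + 1) 1 = [] :=
        PySem.List.pyRange_one_eq_nil (by omega)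
      have htw : pvTwins sieve ((n:Int) + 1) = [] := by
        unfold pvTwins; rw [hA1]; rfl
      have hcnt0 : ∀ j ∈ PySem.List.pyRange 0 ((n:Int) + 1) 1,
          pvCntLe sieve ((n:Int) + 1) j = 0 := by
        intro j _; unfold pvCntLe; rw [htw]; simp
      push_cast [hA1] at *
      rw [List.foldl_nil, List.map_congr_left hcnt0, htw]
      refine Prod.ext ?_ (by simp)
      show List.replicate (n + 1) (0:Int) = List.map (fun _ => (0:Int)) _
      rw [List.map_const']
      congr 1
      simp [PySem.List.length_pyRange_one]

-- ===== VERDICT (by name: the statement is the Claim_ definition above) =====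
theorem precompute_twin_prime_counts_spec : Claim_equal_precompute_twin_prime_counts := by
  intro sieve max_n _ _
  unfold Spec_precompute_twin_prime_counts
  show ((PySem.List.pyRange 3 (max_n + 1) 1).foldl (pvStepA sieve)
        (List.replicate (max_n + 1).toNat 0, 0)).1
      = (PySem.List.pyRange 0 (max_n + 1) 1).map (fun i => pvRank (pvTwins sieve (max_n + 1)) i)
  rw [pyRange_toNat 3 (max_n + 1) (by omega), pyRange_toNat 0 (max_n + 1) (by omega),
      show pvTwins sieve (max_n + 1) = pvTwins sieve (((max_n + 1).toNat : Nat) : Int) from by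
        unfold pvTwins; rw [pyRange_toNat 3 (max_n + 1) (by omega)],
      mainA sieve (max_n + 1).toNat]
  exact (List.map_congr_left
    (fun j _ => (rank_eq_cnt sieve (((max_n + 1).toNat : Nat) : Int) j))).symm
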